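-- pv_equiv track=rewrite | github.com/dhanesh-airaai/aira_relay | agents/tooling/services/phonetic/contacts.py | _aggregate_by_key
-- ===== SOURCE A (Python) =====
-- def _aggregate_by_key(
--     phonetic_entries: list[tuple[str, str, str]],
-- ) -> dict[str, tuple[str, set[str]]]:
--     """Map each original_word → (phonetic_tag, set of w_chat_ids)."""
--     key_to_data: dict[str, tuple[str, set[str]]] = {}
--     for tag, word, w_chat_id in phonetic_entries:
--         if word in key_to_data:
--             key_to_data[word][1].add(w_chat_id)
--         else:
--             key_to_data[word] = (tag, {w_chat_id})
--     return key_to_data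
-- ===== SOURCE B (Python) =====
-- def _aggregate_by_key(
--     phonetic_entries: list[tuple[str, str, str]],
-- ) -> dict[str, tuple[str, set[str]]]:
--     """Map each original_word -> (phonetic_tag, set of w_chat_ids).
--
--     Staged algorithm: first collect the distinct words in first-occurrence
--     order, then for each word rescan the whole list for its first tag and
--     the set of its chat ids (no incremental dict is ever built).
--     """
--     words = dict.fromkeys(word for _, word, _ in phonetic_entries)
--     return {
--         word: (
--             next(t for t, w, _ in phonetic_entries if w == word),
--             {c for _, w, c in phonetic_entries if w == word},
--         )
--         for word in words
--     }
-- ===== Notes on version B (the rewrite author's own statement) =====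
-- stated objective: alternative
-- what changed: Replaces A's single-pass incremental dict of (tag, set) tuples with a staged nested-scan algorithm: one pass collects the distinct words in first-occurrence order, then each word rescans the whole list for its first tag and its id-set.
import Mathlib
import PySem

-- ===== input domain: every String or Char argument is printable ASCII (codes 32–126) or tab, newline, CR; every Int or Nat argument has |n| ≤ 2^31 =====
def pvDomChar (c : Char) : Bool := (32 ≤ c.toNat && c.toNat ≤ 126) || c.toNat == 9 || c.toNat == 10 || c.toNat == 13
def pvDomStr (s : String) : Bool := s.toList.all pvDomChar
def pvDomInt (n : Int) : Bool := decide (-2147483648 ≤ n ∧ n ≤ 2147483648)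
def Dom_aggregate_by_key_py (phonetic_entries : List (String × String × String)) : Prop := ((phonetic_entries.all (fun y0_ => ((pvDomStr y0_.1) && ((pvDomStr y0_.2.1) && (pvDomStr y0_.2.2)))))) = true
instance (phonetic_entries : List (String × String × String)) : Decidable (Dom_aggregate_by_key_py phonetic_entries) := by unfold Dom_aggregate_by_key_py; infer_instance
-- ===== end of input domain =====

-- B replaces A's single-pass incremental dict with a staged nested-scan algorithm:
-- collect the distinct words first, then rescan the list per word for its first tag
-- and its id-set; same result, different algorithm (O(n·k) instead of one pass).

-- ===== PORT A =====
-- one loop step of A: 'if word in key_to_data: key_to_data[word][1].add(w_chat_id)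
--                      else: key_to_data[word] = (tag, {w_chat_id})'
def aggStepA (d : PySem.Dict String (String × List String)) (e : String × String × String) :
    PySem.Dict String (String × List String) :=
  if d.contains e.2.1 then
    -- in-place 'key_to_data[word][1].add(w_chat_id)' = modify the stored pair
    d.modify e.2.1 ("", []) (fun p => (p.1, PySem.Set.add p.2 e.2.2))
  else
    d.insert e.2.1 (e.1, PySem.Set.ofList [e.2.2])

def aggregate_by_key_py (phonetic_entries : List (String × String × String)) :
    List (String × String × List String) :=
  (phonetic_entries.foldl aggStepA PySem.Dict.empty).items

-- ===== PORT B =====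
-- 'next(t for t, w, _ in phonetic_entries if w == word)' — the first tag for word;
-- the "" default is unreachable: word is always drawn from the list's own words
def firstTagOf (l : List (String × String × String)) (word : String) : String :=
  match l.find? (fun e => e.2.1 == word) with
  | some e => e.1
  | none => ""

-- '{c for _, w, c in phonetic_entries if w == word}' — the set comprehension
def idsOf (l : List (String × String × String)) (word : String) : List String :=
  PySem.Set.ofList ((l.filter (fun e => e.2.1 == word)).map (fun e => e.2.2))

def aggregate_by_key_py_alt (phonetic_entries : List (String × String × String)) :
    List (String × String × List String) :=
  -- 'words = dict.fromkeys(word for _, word, _ in phonetic_entries)'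
  let words := PySem.List.dedup (phonetic_entries.map (fun e => e.2.1))
  -- '{word: (next(...), {...}) for word in words}' — keys already distinct
  words.map (fun w => (w, firstTagOf phonetic_entries w, idsOf phonetic_entries w))

-- ===== PRECONDITION & SPEC =====
def Spec_aggregate_by_key_py (phonetic_entries : List (String × String × String)) (out : List (String × String × List String)) : Prop := out = aggregate_by_key_py_alt phonetic_entries
instance (phonetic_entries : List (String × String × String)) (out : List (String × String × List String)) : Decidable (Spec_aggregate_by_key_py phonetic_entries out) := by unfold Spec_aggregate_by_key_py; infer_instance

-- ===== CLAIM (what is proved, stated in full; the proofs are below) =====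
def Claim_equal_aggregate_by_key_py : Prop := ∀ (phonetic_entries : List (String × String × String)), Dom_aggregate_by_key_py phonetic_entries → Spec_aggregate_by_key_py phonetic_entries (aggregate_by_key_py phonetic_entries)

-- ===== LEMMAS AND PROOFS =====

-- B's value computed over a prefix p (the loop invariant's right-hand side)
def specOf (p : List (String × String × String)) : List (String × String × List String) :=
  (PySem.Set.ofList (p.map (fun e => e.2.1))).map (fun w => (w, firstTagOf p w, idsOf p w))

theorem keys_of_spec (d : PySem.Dict String (String × List String))
    (p : List (String × String × String)) (h : d.items = specOf p) :
    d.keys = PySem.Set.ofList (p.map (fun e => e.2.1)) := by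
  simp [PySem.Dict.keys, h, specOf, List.map_map, Function.comp_def]

-- appending one entry updates B's per-word values as A's one loop step does
theorem firstTagOf_append_of_mem (p : List (String × String × String))
    (e : String × String × String) (w : String) (hw : w ∈ p.map (fun e => e.2.1)) :
    firstTagOf (p ++ [e]) w = firstTagOf p w := by
  obtain ⟨x, hx, hxe⟩ := List.mem_map.mp hw
  have : (p.find? (fun e => e.2.1 == w)).isSome := by
    rw [List.find?_isSome]; exact ⟨x, hx, by simp [hxe]⟩
  obtain ⟨y, hy⟩ := Option.isSome_iff_exists.mp this
  simp [firstTagOf, List.find?_append, hy]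

theorem firstTagOf_append_of_ne (p : List (String × String × String))
    (e : String × String × String) (w : String) (hne : w ≠ e.2.1) :
    firstTagOf (p ++ [e]) w = firstTagOf p w := by
  have hb : (e.2.1 == w) = false := by simpa using fun h => hne h.symm
  have : ([e].find? (fun x => x.2.1 == w)) = none := by simp [List.find?, hb]
  cases hf : p.find? (fun x => x.2.1 == w) <;>
    simp [firstTagOf, List.find?_append, hf, this]

theorem idsOf_append (p : List (String × String × String))
    (e : String × String × String) (w : String) :
    idsOf (p ++ [e]) w =
      if e.2.1 = w then PySem.Set.add (idsOf p w) e.2.2 else idsOf p w := by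
  by_cases h : e.2.1 = w
  · have hb : (e.2.1 == w) = true := by simpa using h
    simp [idsOf, List.filter_append, List.filter, h, PySem.Set.ofList_append_singleton]
  · have hb : (e.2.1 == w) = false := by simpa using h
    simp [idsOf, List.filter_append, List.filter, h, hb]

-- one loop step of A preserves the invariant 'd.items = specOf p'
theorem step_spec (p : List (String × String × String))
    (e : String × String × String) (d : PySem.Dict String (String × List String))
    (h : d.items = specOf p) : (aggStepA d e).items = specOf (p ++ [e]) := by
  obtain ⟨tag, word, wid⟩ := e
  have hkeys := keys_of_spec d p h
  have hnd : d.keys.Nodup := by rw [hkeys]; exact PySem.Set.nodup_ofList _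
  by_cases hc : d.contains word = true
  · -- word seen before: A modifies the stored pair in place
    have hmem : word ∈ p.map (fun e => e.2.1) := by
      have := (PySem.Dict.contains_iff_mem_keys d word).mp hc
      rw [hkeys] at this; exact (PySem.Set.mem_ofList _ _).mp this
    have hgetD : d.getD word ("", []) = (firstTagOf p word, idsOf p word) := by
      apply PySem.Dict.getD_of_mem_items d _ hnd
      rw [h, specOf]
      exact List.mem_map_of_mem ((PySem.Set.mem_ofList _ _).mpr hmem)
    have hset : PySem.Set.ofList ((p ++ [(tag, word, wid)]).map (fun e => e.2.1)) =
        PySem.Set.ofList (p.map (fun e => e.2.1)) := by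
      rw [List.map_append]
      simp only [List.map_cons, List.map_nil]
      rw [PySem.Set.ofList_append_singleton]
      exact PySem.Set.add_of_mem ((PySem.Set.mem_ofList _ _).mpr hmem)
    show (aggStepA d (tag, word, wid)).items = _
    simp only [aggStepA, hc, if_true, PySem.Dict.modify]
    rw [PySem.Dict.items_insert_of_contains _ _ hc, h, specOf, specOf, hset, List.map_map]
    refine List.map_congr_left (fun w hw => ?_)
    by_cases hww : w = word
    · subst hww
      simp [hgetD, firstTagOf_append_of_mem p _ w hmem, idsOf_append]
    · have : (w == word) = false := by simpa using hww
      rw [firstTagOf_append_of_ne p (tag, word, wid) w hww, idsOf_append]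
      simp [hww, Ne.symm hww]
  · -- fresh word: A appends a new pair
    have hcn : d.contains word = false := by simpa using hc
    have hmem : word ∉ p.map (fun e => e.2.1) := fun hmem =>
      hc ((PySem.Dict.contains_iff_mem_keys d word).mpr
        (hkeys ▸ (PySem.Set.mem_ofList _ _).mpr hmem))
    have hset : PySem.Set.ofList ((p ++ [(tag, word, wid)]).map (fun e => e.2.1)) =
        PySem.Set.ofList (p.map (fun e => e.2.1)) ++ [word] := by
      rw [List.map_append]
      simp only [List.map_cons, List.map_nil]
      rw [PySem.Set.ofList_append_singleton]
      exact PySem.Set.add_of_not_mem (fun hm => hmem ((PySem.Set.mem_ofList _ _).mp hm))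
    have hfind : p.find? (fun e => e.2.1 == word) = none := by
      rw [List.find?_eq_none]
      intro x hx hbx
      exact hmem (List.mem_map.mpr ⟨x, hx, by simpa using hbx⟩)
    have hfilter : p.filter (fun e => e.2.1 == word) = [] := by
      rw [List.filter_eq_nil_iff]
      intro x hx hbx
      exact hmem (List.mem_map.mpr ⟨x, hx, by simpa using hbx⟩)
    show (aggStepA d (tag, word, wid)).items = _
    simp only [aggStepA, hcn, if_false, Bool.false_eq_true]
    rw [PySem.Dict.items_insert_of_not_contains _ _ hcn, h, specOf, specOf, hset,
      List.map_append]
    congr 1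
    · refine List.map_congr_left (fun w hw => ?_)
      have hww : w ≠ word := fun hww =>
        hmem (hww ▸ (PySem.Set.mem_ofList _ _).mp hw)
      rw [firstTagOf_append_of_ne p (tag, word, wid) w hww, idsOf_append]
      simp [Ne.symm hww]
    · simp [firstTagOf, List.find?_append, hfind, List.find?, idsOf,
        List.filter_append, List.filter, hfilter]

-- the full loop: folding A's step over l extends the invariant from p to p ++ l
theorem agg_inv (l p : List (String × String × String))
    (d : PySem.Dict String (String × List String)) (h : d.items = specOf p) :
    (l.foldl aggStepA d).items = specOf (p ++ l) := by
  induction l generalizing p d with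
  | nil => simpa using h
  | cons e l ih =>
    rw [List.foldl_cons]
    have := ih (p ++ [e]) (aggStepA d e) (step_spec p e d h)
    simpa [List.append_assoc] using this

-- ===== VERDICT (by name: the statement is the Claim_ definition above) =====
theorem aggregate_by_key_py_spec : Claim_equal_aggregate_by_key_py := by
  intro entries _
  show aggregate_by_key_py entries = aggregate_by_key_py_alt entries
  unfold aggregate_by_key_py aggregate_by_key_py_alt
  have := agg_inv entries [] PySem.Dict.empty (by rfl)
  simpa [specOf, PySem.List.dedup_eq_ofList] using this
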